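-- pv_equiv track=rewrite | github.com/dchad/malware-detection | vs/feature_extraction_html.py | count_html_tags
-- ===== SOURCE A (Python) =====
-- def count_html_tags(content, tag_list, klen):
--
--     tag_values = [0] * klen
--
--     for row in content:
--         for i in range(klen):
--             if tag_list[i] in row:
--                 tag_values[i] += 1
--                 break
--
--     return tag_values
-- ===== SOURCE B (Python) =====
-- def count_html_tags(content, tag_list, klen):
--     # Column-major restructuring: each tag, in priority order, is matched against the
--     # rows no earlier tag has claimed; one pass counts its hits and keeps the misses.
--     counts = []
--     remaining = content
--     for tag in tag_list[:max(klen, 0)]: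
--         hits = 0
--         rest = []
--         for row in remaining:
--             if tag in row:
--                 hits += 1
--             else:
--                 rest.append(row)
--         counts.append(hits)
--         remaining = rest
--     counts.extend([0] * (klen - len(counts)))
--     return counts
-- ===== Notes on version B (the rewrite author's own statement) =====
-- stated objective: alternative
-- what changed: A's row-major loop (break on the first matching tag, increment a preallocated array in place) is replaced by a column-major pass: each tag in priority order makes one partition pass over the rows no earlier tag has claimed, counting hits and keeping misses, with the counts list zero-padded to klen.
import Mathlib
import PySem

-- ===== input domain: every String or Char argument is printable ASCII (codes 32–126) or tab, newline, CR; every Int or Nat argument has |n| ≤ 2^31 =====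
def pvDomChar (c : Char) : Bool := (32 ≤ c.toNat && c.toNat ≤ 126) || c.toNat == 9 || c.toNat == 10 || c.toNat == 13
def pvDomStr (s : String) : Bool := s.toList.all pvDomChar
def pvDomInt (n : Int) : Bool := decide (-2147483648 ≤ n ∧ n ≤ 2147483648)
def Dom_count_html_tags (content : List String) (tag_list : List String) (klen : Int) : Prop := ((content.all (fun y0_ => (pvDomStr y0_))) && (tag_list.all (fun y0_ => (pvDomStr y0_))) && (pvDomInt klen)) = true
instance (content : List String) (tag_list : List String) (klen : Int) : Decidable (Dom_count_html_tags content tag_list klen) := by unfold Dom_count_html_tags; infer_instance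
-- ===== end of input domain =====

-- B replaces A's row-major loop (break on first matching tag, increment in place) by a
-- column-major pass: each tag counts and removes the rows it claims from a shrinking list (alternative, same cost).

-- ===== PORT A =====
-- inner 'for i in range(klen): if tag_list[i] in row: … break' — the first matching index;
-- none both when the loop falls through and when tag_list[i] would raise IndexError (the latter excluded by Pre_)
def pvFirstIdxA (tag_list : List String) (row : String) : List Int → Option Int
  | [] => none
  | i :: rest =>
    match PySem.List.pyGet? tag_list i with
    | none => none
    | some t => if PySem.Str.isIn t row then some i else pvFirstIdxA tag_list row rest

def count_html_tags (content : List String) (tag_list : List String) (klen : Int) : List Int :=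
  let init : List Int := List.replicate klen.toNat 0   -- tag_values = [0] * klen
  content.foldl (fun tv row =>
    match pvFirstIdxA tag_list row (PySem.List.pyRange 0 klen 1) with
    | some i => tv.modify i.toNat (· + 1)              -- tag_values[i] += 1; break
    | none => tv) init

-- ===== PORT B =====
def count_html_tags_alt (content : List String) (tag_list : List String) (klen : Int) : List Int :=
  let tags := PySem.List.slice tag_list none (some (max klen 0))      -- tag_list[:max(klen, 0)]
  let st := tags.foldl (fun (st : List Int × List String) tag =>
      let inner := st.2.foldl (fun (p : Int × List String) row =>     -- hits = 0; rest = []; for row in remaining: …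
          if PySem.Str.isIn tag row then (p.1 + 1, p.2) else (p.1, p.2 ++ [row])) ((0 : Int), ([] : List String))
      (st.1 ++ [inner.1], inner.2)) ([], content)
  st.1 ++ List.replicate (klen - (st.1.length : Int)).toNat 0         -- counts.extend([0] * (klen - len(counts)))

-- ===== PRECONDITION & SPEC =====
-- Exactly where Python A returns: A raises IndexError iff klen > len(tag_list) and some row matches no tag at all.
def Pre_count_html_tags (content : List String) (tag_list : List String) (klen : Int) : Prop :=
  klen ≤ (tag_list.length : Int) ∨ ∀ row ∈ content, ∃ t ∈ tag_list, PySem.Str.isIn t row = true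
instance (content : List String) (tag_list : List String) (klen : Int) : Decidable (Pre_count_html_tags content tag_list klen) := by unfold Pre_count_html_tags; infer_instance

def pvWitness_count_html_tags : List String × List String × Int := (["<a href>", "plain"], ["<a", "<b"], 2)

def Spec_count_html_tags (content : List String) (tag_list : List String) (klen : Int) (out : List Int) : Prop := out = count_html_tags_alt content tag_list klen
instance (content : List String) (tag_list : List String) (klen : Int) (out : List Int) : Decidable (Spec_count_html_tags content tag_list klen out) := by unfold Spec_count_html_tags; infer_instance

-- ===== CLAIM (what is proved, stated in full; the proofs are below) =====
def Claim_equal_count_html_tags : Prop := ∀ (content : List String) (tag_list : List String) (klen : Int), Dom_count_html_tags content tag_list klen → Pre_count_html_tags content tag_list klen → Spec_count_html_tags content tag_list klen (count_html_tags content tag_list klen)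

-- ===== LEMMAS AND PROOFS =====

-- Common specification: first index in a tag list whose tag occurs in the row.
def pvF (tags : List String) (row : String) : Option Nat :=
  tags.findIdx? (fun t => PySem.Str.isIn t row)

-- A's inner loop over range(klen) computes pvF on the corresponding slice of tag_list.
theorem pvFirstIdxA_eq (tag_list : List String) (row : String) :
    ∀ (k a : Nat) (b : Int), (b - a).toNat = k →
      pvFirstIdxA tag_list row (PySem.List.pyRange a b 1) =
        (pvF ((tag_list.drop a).take k) row).map (fun n => ((a + n : Nat) : Int)) := by
  intro k
  induction k with
  | zero =>
    intro a b hk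
    rw [PySem.List.pyRange_one_eq_nil (by omega)]
    simp [pvFirstIdxA, pvF]
  | succ k ih =>
    intro a b hk
    rw [PySem.List.pyRange_one_cons (by omega)]
    simp only [pvFirstIdxA]
    rw [PySem.List.pyGet?_natCast]
    cases hj : tag_list[a]? with
    | none =>
      have hd : tag_list.drop a = [] := by
        rw [List.drop_eq_nil_iff]
        exact Nat.le_of_not_lt (fun h => by simp [List.getElem?_eq_getElem h] at hj)
      simp [hd, pvF]
    | some t =>
      have hlt : a < tag_list.length := by
        by_contra h
        simp [List.getElem?_eq_none (Nat.le_of_not_lt h)] at hj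
      have hdrop : tag_list.drop a = t :: tag_list.drop (a + 1) := by
        rw [List.drop_eq_getElem_cons hlt]
        simp [List.getElem?_eq_getElem hlt] at hj
        simp [hj]
      rw [hdrop, List.take_succ_cons]
      unfold pvF
      rw [List.findIdx?_cons]
      by_cases hin : PySem.Str.isIn t row = true
      · rw [if_pos hin]
        simp only [hin, if_true, Option.map_some]
        simp
      · rw [if_neg (by exact hin)]
        rw [show ((a : Int) + 1) = ((a + 1 : Nat) : Int) by push_cast; ring] at *
        rw [ih (a + 1) b (by omega)]
        simp only [hin, Bool.false_eq_true, if_false, Option.map_map, pvF]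
        cases (tag_list.drop (a + 1)).take k |>.findIdx? (fun t => PySem.Str.isIn t row) with
        | none => simp
        | some n => simp; ring

-- A's row loop, characterised pointwise.
theorem pvFoldA_length (G : String → Option Nat) (rows : List String) :
    ∀ init : List Int,
      (rows.foldl (fun tv row => match G row with
        | some i => tv.modify i (· + 1)
        | none => tv) init).length = init.length := by
  induction rows with
  | nil => intro init; rfl
  | cons r rs ih =>
    intro init
    simp only [List.foldl_cons]
    cases G r with
    | none => exact ih init
    | some i => rw [ih]; simp

theorem pvFoldA_getElem (G : String → Option Nat) (rows : List String) :
    ∀ (init : List Int) (n : Nat) (hn : n < init.length),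
      (rows.foldl (fun tv row => match G row with
        | some i => tv.modify i (· + 1)
        | none => tv) init)[n]? =
        some (init[n]'hn + (rows.countP (fun r => G r == some n) : Int)) := by
  induction rows with
  | nil => intro init n hn; simp [List.getElem?_eq_getElem hn]
  | cons r rs ih =>
    intro init n hn
    simp only [List.foldl_cons, List.countP_cons]
    cases hG : G r with
    | none =>
      rw [ih init n hn]
      simp
    | some i =>
      have hlen : n < (init.modify i (· + 1)).length := by simpa using hn
      rw [ih (init.modify i (· + 1)) n hlen]
      rw [List.getElem_modify]
      by_cases hni : i = n
      · simp [hni]; ring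
      · simp [hni]

-- B's tag loop in cons form.
def pvBloop : List String → List String → List Int
  | [], _ => []
  | t :: ts, rem =>
    ((rem.filter (fun row => PySem.Str.isIn t row)).length : Int) ::
      pvBloop ts (rem.filter (fun row => !PySem.Str.isIn t row))

-- B's inner row pass computes (number of hits, the missed rows).
theorem pvScan_eq (tag : String) (rows : List String) :
    ∀ (c : Int) (l : List String),
      rows.foldl (fun (p : Int × List String) row =>
          if PySem.Str.isIn tag row then (p.1 + 1, p.2) else (p.1, p.2 ++ [row])) (c, l) =
        (c + ((rows.filter (fun row => PySem.Str.isIn tag row)).length : Int),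
         l ++ rows.filter (fun row => !PySem.Str.isIn tag row)) := by
  induction rows with
  | nil => intro c l; simp
  | cons r rs ih =>
    intro c l
    simp only [List.foldl_cons, List.filter_cons]
    by_cases hin : PySem.Str.isIn tag r = true
    · simp only [hin, if_true, Bool.not_true, ih]
      simp
      ring
    · simp only [hin, Bool.false_eq_true, if_false, Bool.not_false, ih]
      simp

theorem pvBfold_eq (tags : List String) :
    ∀ (counts : List Int) (rem : List String),
      (tags.foldl (fun (st : List Int × List String) tag =>
        let inner := st.2.foldl (fun (p : Int × List String) row =>
            if PySem.Str.isIn tag row then (p.1 + 1, p.2) else (p.1, p.2 ++ [row])) ((0 : Int), ([] : List String))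
        (st.1 ++ [inner.1], inner.2)) (counts, rem)).1 =
        counts ++ pvBloop tags rem := by
  induction tags with
  | nil => intro counts rem; simp [pvBloop]
  | cons t ts ih =>
    intro counts rem
    simp only [List.foldl_cons, pvBloop]
    rw [pvScan_eq]
    simp only [zero_add, List.nil_append]
    rw [ih]
    simp

theorem pvBloop_length (tags : List String) : ∀ rem, (pvBloop tags rem).length = tags.length := by
  induction tags with
  | nil => intro rem; rfl
  | cons t ts ih => intro rem; simp [pvBloop, ih]

theorem pvBloop_getElem (tags : List String) :
    ∀ (rem : List String) (n : Nat), n < tags.length →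
      (pvBloop tags rem)[n]? =
        some ((rem.countP (fun r => pvF tags r == some n) : Int)) := by
  induction tags with
  | nil => intro rem n hn; simp at hn
  | cons t ts ih =>
    intro rem n hn
    cases n with
    | zero =>
      simp only [pvBloop, List.getElem?_cons_zero, Option.some_inj]
      simp only [← List.countP_eq_length_filter]
      congr 1
      apply List.countP_congr
      intro r _
      simp only [pvF, List.findIdx?_cons, PySem.Str.isIn_eq]
      by_cases hin : PySem.Chars.isIn t.toList r.toList = true
      · simp [hin]
      · simp only [hin, Bool.false_eq_true, if_false]
        cases ts.findIdx? (fun t => PySem.Chars.isIn t.toList r.toList) with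
        | none => simp
        | some m => simp
    | succ n =>
      simp only [pvBloop, List.getElem?_cons_succ]
      rw [ih _ n (by simpa using hn), Option.some_inj]
      rw [List.countP_filter]
      congr 1
      apply List.countP_congr
      intro r _
      simp only [pvF, List.findIdx?_cons, PySem.Str.isIn_eq]
      by_cases hin : PySem.Chars.isIn t.toList r.toList = true
      · simp [hin]
      · simp only [hin, Bool.false_eq_true, if_false, Bool.not_false, Bool.and_true]
        cases ts.findIdx? (fun t => PySem.Chars.isIn t.toList r.toList) with
        | none => simp
        | some m => simp

-- The main equality: the two ports agree on every Lean input.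
theorem pv_main (content tag_list : List String) (klen : Int) :
    count_html_tags content tag_list klen = count_html_tags_alt content tag_list klen := by
  unfold count_html_tags count_html_tags_alt
  have hslice : PySem.List.slice tag_list none (some (max klen 0)) = tag_list.take klen.toNat := by
    rw [PySem.List.slice_to tag_list (le_max_right klen 0)]
    congr 1
    omega
  rw [hslice]
  dsimp only
  rw [pvBfold_eq]
  simp only [List.nil_append]
  set T := tag_list.take klen.toNat with hT
  set L := klen.toNat with hL
  have hTlen : T.length = min L tag_list.length := by simp [hT]
  -- rewrite A's step through the common spec pvF
  have hstep : (fun (tv : List Int) (row : String) =>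
      match pvFirstIdxA tag_list row (PySem.List.pyRange 0 klen 1) with
      | some i => tv.modify i.toNat (· + 1)
      | none => tv) =
      (fun (tv : List Int) (row : String) =>
      match pvF T row with
      | some n => tv.modify n (· + 1)
      | none => tv) := by
    funext tv row
    have h := pvFirstIdxA_eq tag_list row L 0 klen (by omega)
    rw [Nat.cast_zero] at h
    rw [h]
    simp only [List.drop_zero]
    cases pvF T row with
    | none => simp
    | some n => simp
  rw [hstep]
  apply List.ext_getElem
  · rw [pvFoldA_length]
    simp [pvBloop_length, hTlen]
    omega
  · intro n h1 h2
    have hnL : n < L := by rw [pvFoldA_length] at h1; simpa using h1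
    have hA := pvFoldA_getElem (pvF T) content (List.replicate L 0) n (by simpa using hnL)
    rw [List.getElem?_eq_getElem h1, Option.some_inj] at hA
    rw [hA]
    simp only [List.getElem_replicate, zero_add]
    by_cases hcase : n < T.length
    · rw [List.getElem_append_left (by rw [pvBloop_length]; exact hcase)]
      have hB := pvBloop_getElem T content n hcase
      rw [List.getElem?_eq_getElem (by rw [pvBloop_length]; exact hcase), Option.some_inj] at hB
      rw [hB]
    · rw [List.getElem_append_right (by rw [pvBloop_length]; omega)]
      rw [List.getElem_replicate]
      have : content.countP (fun r => pvF T r == some n) = 0 := by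
        rw [List.countP_eq_zero]
        intro r _
        simp only [beq_iff_eq]
        intro hEq
        have := (List.findIdx?_eq_some_iff_findIdx_eq.mp hEq).1
        omega
      simp [this]

-- ===== VERDICT (by name: the statement is the Claim_ definition above) =====
theorem count_html_tags_spec : Claim_equal_count_html_tags := by
  intro content tag_list klen _ _
  unfold Spec_count_html_tags
  exact pv_main content tag_list klen
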